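-- pv_equiv track=rewrite | github.com/mviol42/SwaT5 | verb_generator.py | find_harmony_class
-- ===== SOURCE A (Python) =====
-- def find_harmony_class(stem):
--     high_harmony = "aiu"
--     mid_harmony = "eo"
--     for char in reversed(stem):
--         if char in high_harmony:
--             return "high"
--         elif char in mid_harmony:
--             return "mid"
--     raise Exception("No harmony class for stem", stem)
-- ===== SOURCE B (Python) =====
-- def find_harmony_class(stem):
--     vowels = [c for c in stem if c in "aiueo"]
--     if not vowels:
--         raise Exception("No harmony class for stem", stem)
--     return "high" if vowels[-1] in "aiu" else "mid"
-- ===== Notes on version B (the rewrite author's own statement) =====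
-- stated objective: alternative
-- what changed: Instead of scanning from the end with early returns per harmony class, B makes one forward pass collecting all vowels and classifies the last collected vowel.
import Mathlib
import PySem

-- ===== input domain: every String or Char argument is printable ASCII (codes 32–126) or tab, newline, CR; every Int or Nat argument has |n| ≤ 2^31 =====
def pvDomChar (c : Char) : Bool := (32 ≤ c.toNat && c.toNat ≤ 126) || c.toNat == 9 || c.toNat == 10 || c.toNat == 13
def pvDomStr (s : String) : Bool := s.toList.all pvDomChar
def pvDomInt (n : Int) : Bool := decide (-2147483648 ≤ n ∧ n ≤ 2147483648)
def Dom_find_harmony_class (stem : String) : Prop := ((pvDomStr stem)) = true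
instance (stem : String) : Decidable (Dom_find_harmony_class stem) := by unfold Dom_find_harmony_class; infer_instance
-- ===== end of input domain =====

-- B changes the decomposition (collect all vowels forward, classify the last) vs A's
-- backward scan with early return; equal on all stems containing a vowel (Pre_).

-- ===== PORT A =====
-- A's loop over reversed(stem); the raise at the end is excluded by Pre_ ("" placeholder).
def findHarmonyLoopA : List Char → String
  | [] => ""
  | c :: rest =>
    if c ∈ "aiu".toList then "high"
    else if c ∈ "eo".toList then "mid"
    else findHarmonyLoopA rest

def find_harmony_class (stem : String) : String :=
  findHarmonyLoopA stem.toList.reverse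

-- ===== PORT B =====
-- B: one forward pass collecting vowels, then classify the last one ("" on the raise case).
def find_harmony_class_alt (stem : String) : String :=
  let vowels := stem.toList.filter (fun c => c ∈ "aiueo".toList)
  match vowels.getLast? with
  | none => ""
  | some v => if v ∈ "aiu".toList then "high" else "mid"

-- ===== PRECONDITION & SPEC =====
-- Pre_ excludes stems with no character from "aiueo": there Python A (and B) raise Exception.
def Pre_find_harmony_class (stem : String) : Prop :=
  (stem.toList.any (fun c => c ∈ "aiueo".toList)) = true
instance (stem : String) : Decidable (Pre_find_harmony_class stem) := by
  unfold Pre_find_harmony_class; infer_instance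
def pvWitness_find_harmony_class : String := "a"

def Spec_find_harmony_class (stem : String) (out : String) : Prop := out = find_harmony_class_alt stem
instance (stem : String) (out : String) : Decidable (Spec_find_harmony_class stem out) := by unfold Spec_find_harmony_class; infer_instance

-- ===== CLAIM (what is proved, stated in full; the proofs are below) =====
def Claim_equal_find_harmony_class : Prop := ∀ (stem : String), Dom_find_harmony_class stem → Pre_find_harmony_class stem → Spec_find_harmony_class stem (find_harmony_class stem)

-- ===== LEMMAS AND PROOFS =====

-- A's backward scan equals B's classify-last-filtered-vowel, on every list.
theorem findHarmonyLoopA_eq (m : List Char) :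
    findHarmonyLoopA m =
      (match (m.reverse.filter (fun c => c ∈ "aiueo".toList)).getLast? with
       | none => ""
       | some v => if v ∈ "aiu".toList then "high" else "mid") := by
  have e1 : "aiueo".toList = ['a','i','u','e','o'] := by decide
  have e2 : "aiu".toList = ['a','i','u'] := by decide
  have e3 : "eo".toList = ['e','o'] := by decide
  induction m with
  | nil => simp [findHarmonyLoopA]
  | cons c rest ih =>
    by_cases h1 : c ∈ ['a','i','u']
    · fin_cases h1 <;> simp [findHarmonyLoopA, e1, e2, List.filter_append]
    · by_cases h2 : c ∈ ['e','o']
      · fin_cases h2 <;> simp [findHarmonyLoopA, e1, e2, e3, List.filter_append]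
      · have hv : c ∉ ['a','i','u','e','o'] := by
          intro hc; fin_cases hc <;> simp_all
        simp only [List.mem_cons, List.not_mem_nil, or_false] at h1 h2 hv
        simp [findHarmonyLoopA, e1, e2, e3, h1, h2, ih]

-- ===== VERDICT (by name: the statement is the Claim_ definition above) =====
theorem find_harmony_class_spec : Claim_equal_find_harmony_class := by
  intro stem _ _
  unfold Spec_find_harmony_class find_harmony_class find_harmony_class_alt
  simpa using findHarmonyLoopA_eq stem.toList.reverse
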